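-- pv_equiv track=rewrite | github.com/tetsuo-komatsuzaki/music-app | scripts/generate_scale_mxl.py | find_best_starting_octave
-- ===== SOURCE A (Python) =====
-- VIOLIN_LOW = 55   # G3
--
-- VIOLIN_HIGH = 100  # E7
--
-- def find_best_starting_octave(root_semi, octaves):
--     """バイオリン音域内に収まる最低の開始オクターブを返す（低音域優先）。
--     音域を完全に収めるオクターブが存在しない場合は、ルート音のVIOLIN_LOW以上の
--     最低オクターブを返す（上端ノートはVIOLIN_HIGHにクランプされる）。
--     """
--     # 低いオクターブから順に試す → 常に最低有効位置を返す
--     for start_oct in range(2, 8):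
--         base = start_oct * 12 + root_semi
--         top = base + octaves * 12
--         if base >= VIOLIN_LOW and top <= VIOLIN_HIGH:
--             return base
--     # 完全に収まるオクターブなし: ルート音の最低有効オクターブを返す
--     for start_oct in range(2, 8):
--         base = start_oct * 12 + root_semi
--         if base >= VIOLIN_LOW:
--             return base
--     return VIOLIN_LOW
-- ===== SOURCE B (Python) =====
-- VIOLIN_LOW = 55   # G3
--
-- VIOLIN_HIGH = 100  # E7
--
-- def find_best_starting_octave(root_semi, octaves):
--     """Closed form: the loop's answer is always the lowest octave in [2,7] whose
--     base reaches VIOLIN_LOW (the full-fit pass and the fallback pass pick the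
--     same octave whenever either returns), else VIOLIN_LOW."""
--     s = max(2, -((root_semi - VIOLIN_LOW) // 12))  # ceil((55 - root_semi)/12), floored at 2
--     return 12 * s + root_semi if s <= 7 else VIOLIN_LOW
-- ===== Notes on version B (the rewrite author's own statement) =====
-- stated objective: simpler
-- what changed: Replaces A's two sequential scans over octaves 2..7 with a single closed-form ceiling division (the full-fit pass and the fallback pass provably pick the same octave whenever either returns), so B has no loops at all.
import Mathlib
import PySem

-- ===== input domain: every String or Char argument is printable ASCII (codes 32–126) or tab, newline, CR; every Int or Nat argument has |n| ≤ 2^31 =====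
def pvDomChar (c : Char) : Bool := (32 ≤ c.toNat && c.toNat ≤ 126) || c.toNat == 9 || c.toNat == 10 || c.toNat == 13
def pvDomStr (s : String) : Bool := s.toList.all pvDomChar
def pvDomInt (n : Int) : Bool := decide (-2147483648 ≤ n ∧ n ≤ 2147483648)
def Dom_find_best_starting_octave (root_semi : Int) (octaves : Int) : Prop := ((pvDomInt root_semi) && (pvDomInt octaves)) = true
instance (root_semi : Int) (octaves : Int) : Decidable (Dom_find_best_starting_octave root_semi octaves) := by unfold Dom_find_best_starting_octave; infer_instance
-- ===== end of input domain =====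

-- B replaces A's two scans over octaves 2..7 with one closed-form ceiling division (simpler; no loops).

-- ===== PORT A =====
-- first loop: return base of the first octave whose whole span fits the violin range
def pvLoop1_find_best_starting_octave (root_semi : Int) (octaves : Int) : List Int → Option Int
  | [] => none
  | start_oct :: rest =>
      let base := start_oct * 12 + root_semi
      let top := base + octaves * 12
      if base ≥ 55 ∧ top ≤ 100 then some base
      else pvLoop1_find_best_starting_octave root_semi octaves rest

-- second loop: return base of the first octave at or above VIOLIN_LOW
def pvLoop2_find_best_starting_octave (root_semi : Int) : List Int → Option Int
  | [] => none
  | start_oct :: rest =>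
      let base := start_oct * 12 + root_semi
      if base ≥ 55 then some base
      else pvLoop2_find_best_starting_octave root_semi rest

def find_best_starting_octave (root_semi : Int) (octaves : Int) : Int :=
  match pvLoop1_find_best_starting_octave root_semi octaves (PySem.List.pyRange 2 8 1) with
  | some b => b
  | none =>
      match pvLoop2_find_best_starting_octave root_semi (PySem.List.pyRange 2 8 1) with
      | some b => b
      | none => 55

-- ===== PORT B =====
def find_best_starting_octave_alt (root_semi : Int) (octaves : Int) : Int :=
  let s := max 2 (-(PySem.Int.floordiv (root_semi - 55) 12))
  if s ≤ 7 then 12 * s + root_semi else 55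

-- ===== PRECONDITION & SPEC =====
def Spec_find_best_starting_octave (root_semi : Int) (octaves : Int) (out : Int) : Prop := out = find_best_starting_octave_alt root_semi octaves
instance (root_semi : Int) (octaves : Int) (out : Int) : Decidable (Spec_find_best_starting_octave root_semi octaves out) := by unfold Spec_find_best_starting_octave; infer_instance

-- ===== CLAIM (what is proved, stated in full; the proofs are below) =====
def Claim_equal_find_best_starting_octave : Prop := ∀ (root_semi : Int) (octaves : Int), Dom_find_best_starting_octave root_semi octaves → Spec_find_best_starting_octave root_semi octaves (find_best_starting_octave root_semi octaves)

-- ===== LEMMAS AND PROOFS =====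

theorem pvRange28 : PySem.List.pyRange 2 8 1 = [2, 3, 4, 5, 6, 7] := by decide

-- ===== VERDICT (by name: the statement is the Claim_ definition above) =====
set_option maxHeartbeats 1600000 in
theorem find_best_starting_octave_spec : Claim_equal_find_best_starting_octave := by
  intro root_semi octaves _
  unfold Spec_find_best_starting_octave find_best_starting_octave find_best_starting_octave_alt
  have hd := (PySem.Int.floordiv_eq_iff_of_pos (a := root_semi - 55) (b := 12)
      (q := PySem.Int.floordiv (root_semi - 55) 12) (by norm_num)).1 rfl
  rw [pvRange28]
  simp only [pvLoop1_find_best_starting_octave, pvLoop2_find_best_starting_octave]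
  set q := PySem.Int.floordiv (root_semi - 55) 12 with hq
  split_ifs <;> dsimp only <;> omega
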